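-- pv_equiv track=rewrite | github.com/sdtchu/471 | PA2/PA2/ms.py | init_positions
-- ===== SOURCE A (Python) =====
-- def init_positions(n:int):
--     positions = {}
--     horiz = []
--     vert = []
--     diag = []
--
--     # horizontal group positions
--     for i in range(n):
--         horiz.append([i * n + j for j in range(n)])
--
--     # vertical group positions
--     for i in range(n):
--         vert.append([j * n + i for j in range(n)])
--
--     # upper left to bottom right diagonal
--     diag.append([i * (n + 1) for i in range(n)])
--     # upper right to bottom left diagonal
--     diag.append([(i + 1) * (n - 1) for i in range(n)])
--
--     positions = {"horizontals": horiz, "verticals": vert, "diagonals": diag}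
--
--     return positions
-- ===== SOURCE B (Python) =====
-- def init_positions(n: int):
--     # One sweep over the grid cells with a running cell counter: each cell is
--     # dispatched to its row, column and (when on one) diagonal group as it is visited.
--     horiz = [[] for _ in range(n)]
--     vert = [[] for _ in range(n)]
--     d0, d1 = [], []
--     k = 0
--     for r in range(n):
--         for c in range(n):
--             horiz[r].append(k)
--             vert[c].append(k)
--             if r == c:
--                 d0.append(k)
--             if r + c == n - 1:
--                 d1.append(k)
--             k += 1
--     return {"horizontals": horiz, "verticals": vert, "diagonals": [d0, d1]}
-- ===== Notes on version B (the rewrite author's own statement) =====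
-- stated objective: alternative
-- what changed: B makes a single sweep over the grid cells with a running cell counter, dispatching each cell into its row bucket, column bucket and (when on one) diagonal lists, instead of A's three independent arithmetic constructions of the groups.
import Mathlib
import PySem

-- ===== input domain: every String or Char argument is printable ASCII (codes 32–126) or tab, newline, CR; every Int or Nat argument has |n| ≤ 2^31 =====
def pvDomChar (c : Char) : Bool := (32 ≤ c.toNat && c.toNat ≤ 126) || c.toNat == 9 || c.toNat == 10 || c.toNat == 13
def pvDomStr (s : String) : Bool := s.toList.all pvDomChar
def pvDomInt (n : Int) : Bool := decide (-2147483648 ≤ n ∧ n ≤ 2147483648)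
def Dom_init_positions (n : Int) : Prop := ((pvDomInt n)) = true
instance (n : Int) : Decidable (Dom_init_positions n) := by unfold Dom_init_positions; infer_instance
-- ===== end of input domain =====

-- B replaces A's three independent group-by-group constructions by one sweep over the grid
-- cells with a running counter, dispatching each cell to its groups (alternative decomposition).

-- ===== PORT A =====
-- literal transliteration: two append loops over range(n), then the two diagonal comprehensions
def init_positions (n : Int) : List (String × List (List Int)) :=
  let horiz := (PySem.List.pyRange 0 n 1).foldl
    (fun acc i => acc ++ [(PySem.List.pyRange 0 n 1).map (fun j => i * n + j)]) []
  let vert := (PySem.List.pyRange 0 n 1).foldl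
    (fun acc i => acc ++ [(PySem.List.pyRange 0 n 1).map (fun j => j * n + i)]) []
  let diag := ([] : List (List Int)) ++ [(PySem.List.pyRange 0 n 1).map (fun i => i * (n + 1))]
                ++ [(PySem.List.pyRange 0 n 1).map (fun i => (i + 1) * (n - 1))]
  [("horizontals", horiz), ("verticals", vert), ("diagonals", diag)]

-- ===== PORT B =====
-- the loop body: state (horiz, vert, d0, d1, k); horiz[r].append(k) is List.modify at r
-- (r, c are pyRange values, hence nonnegative, so .toNat is exact here)
def pvCell (n r : Int)
    (st : List (List Int) × List (List Int) × List Int × List Int × Int) (c : Int) :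
    List (List Int) × List (List Int) × List Int × List Int × Int :=
  (st.1.modify r.toNat (· ++ [st.2.2.2.2]),
   st.2.1.modify c.toNat (· ++ [st.2.2.2.2]),
   if r = c then st.2.2.1 ++ [st.2.2.2.2] else st.2.2.1,
   if r + c = n - 1 then st.2.2.2.1 ++ [st.2.2.2.2] else st.2.2.2.1,
   st.2.2.2.2 + 1)

def init_positions_alt (n : Int) : List (String × List (List Int)) :=
  let st := (PySem.List.pyRange 0 n 1).foldl
      (fun st r => (PySem.List.pyRange 0 n 1).foldl (pvCell n r) st)
      ((PySem.List.pyRange 0 n 1).map (fun _ => []),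
       (PySem.List.pyRange 0 n 1).map (fun _ => []), [], [], 0)
  [("horizontals", st.1), ("verticals", st.2.1), ("diagonals", [st.2.2.1, st.2.2.2.1])]

-- ===== PRECONDITION & SPEC =====
def Spec_init_positions (n : Int) (out : List (String × List (List Int))) : Prop := out = init_positions_alt n
instance (n : Int) (out : List (String × List (List Int))) : Decidable (Spec_init_positions n out) := by unfold Spec_init_positions; infer_instance

-- ===== CLAIM (what is proved, stated in full; the proofs are below) =====
def Claim_equal_init_positions : Prop := ∀ (n : Int), Dom_init_positions n → Spec_init_positions n (init_positions n)

-- ===== LEMMAS AND PROOFS =====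

-- state at the start of row r (rows < r fully processed)
def pvRow (n r : Int) : List (List Int) × List (List Int) × List Int × List Int × Int :=
  ((PySem.List.pyRange 0 n 1).map
      (fun i => if i < r then (PySem.List.pyRange 0 n 1).map (fun j => i * n + j) else []),
   (PySem.List.pyRange 0 n 1).map
      (fun c => (PySem.List.pyRange 0 r 1).map (fun i => i * n + c)),
   (PySem.List.pyRange 0 r 1).map (fun i => i * (n + 1)),
   (PySem.List.pyRange 0 r 1).map (fun i => (i + 1) * (n - 1)),
   r * n)

-- state within row r, after columns < c processed
def pvSt (n r c : Int) : List (List Int) × List (List Int) × List Int × List Int × Int :=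
  ((PySem.List.pyRange 0 n 1).map
      (fun i => if i < r then (PySem.List.pyRange 0 n 1).map (fun j => i * n + j)
                else if i = r then (PySem.List.pyRange 0 c 1).map (fun j => i * n + j) else []),
   (PySem.List.pyRange 0 n 1).map
      (fun c' => (PySem.List.pyRange 0 (if c' < c then r + 1 else r) 1).map (fun i => i * n + c')),
   (PySem.List.pyRange 0 r 1).map (fun i => i * (n + 1)) ++ (if r < c then [r * (n + 1)] else []),
   (PySem.List.pyRange 0 r 1).map (fun i => (i + 1) * (n - 1))
      ++ (if n - 1 - r < c then [(r + 1) * (n - 1)] else []),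
   r * n + c)

lemma modify_map_pyRange {α : Type} (n r : Int) (h0 : 0 ≤ r) (_h1 : r < n)
    (g : Int → α) (f : α → α) :
    (((PySem.List.pyRange 0 n 1).map g).modify r.toNat f)
      = (PySem.List.pyRange 0 n 1).map (fun i => if i = r then f (g i) else g i) := by
  apply List.ext_getElem
  · simp [List.length_modify]
  · intro k hk hk'
    simp only [List.getElem_modify, List.getElem_map, PySem.List.getElem_pyRange_one]
    split_ifs with hA hB <;> first | rfl | omega

lemma map_pyRange_congr {α : Type} (a b : Int) (f g : Int → α)
    (h : ∀ i, a ≤ i → i < b → f i = g i) :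
    (PySem.List.pyRange a b 1).map f = (PySem.List.pyRange a b 1).map g := by
  refine List.map_congr_left (fun i hi => ?_)
  rw [PySem.List.mem_pyRange_one] at hi
  exact h i hi.1 hi.2

lemma map_pyRange_succ {α : Type} (c : Int) (h : 0 ≤ c) (f : Int → α) :
    (PySem.List.pyRange 0 (c + 1) 1).map f = (PySem.List.pyRange 0 c 1).map f ++ [f c] := by
  rw [PySem.List.pyRange_one_succ_right h, List.map_append, List.map_singleton]

-- one cell step preserves the invariant
lemma cell_step (n r c : Int) (hr0 : 0 ≤ r) (hrn : r < n) (hc0 : 0 ≤ c) (hcn : c < n) :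
    pvCell n r (pvSt n r c) c = pvSt n r (c + 1) := by
  unfold pvCell pvSt
  simp only
  refine congrArg₂ Prod.mk ?_ (congrArg₂ Prod.mk ?_ (congrArg₂ Prod.mk ?_ (congrArg₂ Prod.mk ?_ ?_)))
  · rw [modify_map_pyRange n r hr0 hrn]
    refine map_pyRange_congr 0 n _ _ (fun i hi0 hin => ?_)
    by_cases hir : i = r
    · subst hir
      rw [if_pos rfl, if_neg (lt_irrefl i), if_pos rfl, if_neg (lt_irrefl i), if_pos rfl,
          map_pyRange_succ c hc0]
    · rw [if_neg hir]
      by_cases hlt : i < r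
      · rw [if_pos hlt, if_pos hlt]
      · rw [if_neg hlt, if_neg hir, if_neg hlt, if_neg hir]
  · rw [modify_map_pyRange n c hc0 hcn]
    refine map_pyRange_congr 0 n _ _ (fun c' hc'0 hc'n => ?_)
    by_cases hcc : c' = c
    · subst hcc
      rw [if_pos rfl, if_neg (lt_irrefl c'), if_pos (by omega : c' < c' + 1),
          map_pyRange_succ r hr0]
    · rw [if_neg hcc]
      by_cases hlt : c' < c
      · rw [if_pos hlt, if_pos (by omega : c' < c + 1)]
      · rw [if_neg hlt, if_neg (by omega : ¬ c' < c + 1)]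
  · by_cases hrc : r = c
    · subst hrc
      rw [if_pos rfl, if_neg (lt_irrefl r), List.append_nil, if_pos (by omega : r < r + 1)]
      have : r * n + r = r * (n + 1) := by ring
      rw [this]
    · rw [if_neg hrc]
      by_cases hlt : r < c
      · rw [if_pos hlt, if_pos (by omega : r < c + 1)]
      · rw [if_neg hlt, if_neg (by omega : ¬ r < c + 1)]
  · by_cases hd : r + c = n - 1
    · rw [if_pos hd, if_neg (by omega : ¬ n - 1 - r < c), List.append_nil,
          if_pos (by omega : n - 1 - r < c + 1)]
      have hc' : c = n - 1 - r := by omega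
      have : r * n + c = (r + 1) * (n - 1) := by rw [hc']; ring
      rw [this]
    · rw [if_neg hd]
      by_cases hlt : n - 1 - r < c
      · rw [if_pos hlt, if_pos (by omega : n - 1 - r < c + 1)]
      · rw [if_neg hlt, if_neg (by omega : ¬ n - 1 - r < c + 1)]
  · omega

-- the inner loop carries the invariant from column c to the end of the row
lemma inner_fold (n r : Int) (hr0 : 0 ≤ r) (hrn : r < n) :
    ∀ (m : Nat) (c : Int), 0 ≤ c → c ≤ n → (n - c).toNat = m →
    (PySem.List.pyRange c n 1).foldl (pvCell n r) (pvSt n r c) = pvSt n r n := by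
  intro m
  induction m with
  | zero =>
    intro c hc0 hcn hm
    have hcn' : c = n := by omega
    subst hcn'
    rw [PySem.List.pyRange_one_eq_nil le_rfl]
    rfl
  | succ k ih =>
    intro c hc0 hcn hm
    have hlt : c < n := by omega
    rw [PySem.List.pyRange_one_cons hlt, List.foldl_cons, cell_step n r c hr0 hrn hc0 hlt]
    exact ih (c + 1) (by omega) (by omega) (by omega)

lemma row_start (n r : Int) (hr0 : 0 ≤ r) (hrn : r < n) : pvSt n r 0 = pvRow n r := by
  unfold pvSt pvRow
  refine congrArg₂ Prod.mk ?_ (congrArg₂ Prod.mk ?_ (congrArg₂ Prod.mk ?_ (congrArg₂ Prod.mk ?_ ?_)))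
  · refine map_pyRange_congr 0 n _ _ (fun i hi0 hin => ?_)
    by_cases hlt : i < r
    · rw [if_pos hlt, if_pos hlt]
    · rw [if_neg hlt, if_neg hlt]
      by_cases hir : i = r
      · rw [if_pos hir, PySem.List.pyRange_one_eq_nil le_rfl, List.map_nil]
      · rw [if_neg hir]
  · refine map_pyRange_congr 0 n _ _ (fun c' hc'0 hc'n => ?_)
    rw [if_neg (by omega : ¬ c' < 0)]
  · rw [if_neg (by omega : ¬ r < 0), List.append_nil]
  · rw [if_neg (by omega : ¬ n - 1 - r < 0), List.append_nil]
  · ring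

lemma row_end (n r : Int) (hr0 : 0 ≤ r) (hrn : r < n) : pvSt n r n = pvRow n (r + 1) := by
  unfold pvSt pvRow
  refine congrArg₂ Prod.mk ?_ (congrArg₂ Prod.mk ?_ (congrArg₂ Prod.mk ?_ (congrArg₂ Prod.mk ?_ ?_)))
  · refine map_pyRange_congr 0 n _ _ (fun i hi0 hin => ?_)
    by_cases hlt : i < r
    · rw [if_pos hlt, if_pos (by omega : i < r + 1)]
    · by_cases hir : i = r
      · rw [if_neg hlt, if_pos hir, if_pos (by omega : i < r + 1), hir]
      · rw [if_neg hlt, if_neg hir, if_neg (by omega : ¬ i < r + 1)]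
  · refine map_pyRange_congr 0 n _ _ (fun c' hc'0 hc'n => ?_)
    rw [if_pos hc'n]
  · rw [if_pos hrn, map_pyRange_succ r hr0]
  · rw [if_pos (by omega : n - 1 - r < n), map_pyRange_succ r hr0]
  · ring

lemma outer_fold (n : Int) :
    ∀ (m : Nat) (r : Int), 0 ≤ r → r ≤ n → (n - r).toNat = m →
    (PySem.List.pyRange r n 1).foldl
      (fun st r' => (PySem.List.pyRange 0 n 1).foldl (pvCell n r') st) (pvRow n r) = pvRow n n := by
  intro m
  induction m with
  | zero =>
    intro r hr0 hrn hm
    have : r = n := by omega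
    subst this
    rw [PySem.List.pyRange_one_eq_nil le_rfl]
    rfl
  | succ k ih =>
    intro r hr0 hrn hm
    have hlt : r < n := by omega
    rw [PySem.List.pyRange_one_cons hlt, List.foldl_cons]
    have hrow : (PySem.List.pyRange 0 n 1).foldl (pvCell n r) (pvRow n r) = pvRow n (r + 1) := by
      rw [← row_start n r hr0 hlt, inner_fold n r hr0 hlt (n - 0).toNat 0 le_rfl (by omega) (by omega),
          row_end n r hr0 hlt]
    rw [hrow]
    exact ih (r + 1) (by omega) (by omega) (by omega)

lemma init_state (n : Int) :
    (((PySem.List.pyRange 0 n 1).map (fun _ => ([] : List Int)),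
      (PySem.List.pyRange 0 n 1).map (fun _ => ([] : List Int)),
      ([] : List Int), ([] : List Int), (0 : Int))) = pvRow n 0 := by
  unfold pvRow
  refine congrArg₂ Prod.mk ?_ (congrArg₂ Prod.mk ?_ (congrArg₂ Prod.mk ?_ (congrArg₂ Prod.mk ?_ ?_)))
  · refine map_pyRange_congr 0 n _ _ (fun i hi0 hin => ?_)
    rw [if_neg (by omega : ¬ i < 0)]
  · refine map_pyRange_congr 0 n _ _ (fun c hc0 hcn => ?_)
    rw [PySem.List.pyRange_one_eq_nil le_rfl, List.map_nil]
  · rw [PySem.List.pyRange_one_eq_nil le_rfl, List.map_nil]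
  · rw [PySem.List.pyRange_one_eq_nil le_rfl, List.map_nil]
  · ring

-- ===== VERDICT (by name: the statement is the Claim_ definition above) =====
theorem init_positions_spec : Claim_equal_init_positions := by
  intro n _
  unfold Spec_init_positions init_positions init_positions_alt
  simp only [PySem.List.foldl_append_singleton_eq_map, List.nil_append]
  by_cases hn : 0 ≤ n
  · rw [init_state n, outer_fold n (n - 0).toNat 0 le_rfl hn (by omega)]
    have hH : (PySem.List.pyRange 0 n 1).map
        (fun i => if i < n then (PySem.List.pyRange 0 n 1).map (fun j => i * n + j) else []) =
        (PySem.List.pyRange 0 n 1).map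
        (fun i => (PySem.List.pyRange 0 n 1).map (fun j => i * n + j)) := by
      refine map_pyRange_congr 0 n _ _ (fun i hi0 hin => ?_)
      rw [if_pos hin]
    simp only [pvRow]
    rw [hH]
    rfl
  · rw [PySem.List.pyRange_one_eq_nil (by omega : n ≤ 0)]
    rfl
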